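-- pv_equiv track=rewrite | github.com/Shopping-Stories/SS-Parser-API | data/parser_utils.py | handle_multiple_prices
-- ===== SOURCE A (Python) =====
-- def handle_multiple_prices(entry) -> list:
--     # Search for the number of noun, price pairs, if more than one split around noun followed by price
--     # Ignore people and dates because they are definitely not the item being purchased
--     found_trans = []
--     cur_entry = []
--     found_noun_last = False
--     for word, info, pos in entry:
--         cur_entry.append((word, info, pos))
--         if info == "PRICE" and found_noun_last:
--             found_noun_last = False
--             found_trans.append(cur_entry)
--             cur_entry = []
--         if "NN" in pos and info not in ["PERSON", "DATE"]:
--             found_noun_last = True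
--     if found_trans == []:
--         found_trans.append(cur_entry)
--
--     return found_trans
-- ===== SOURCE B (Python) =====
-- def handle_multiple_prices(entry) -> list:
--     # Two-pass: collect cut indices (noun-then-price boundaries), then slice.
--     rebuilt = [(word, info, pos) for word, info, pos in entry]
--     cuts = []
--     found_noun_last = False
--     for idx, (word, info, pos) in enumerate(entry):
--         if info == "PRICE" and found_noun_last:
--             found_noun_last = False
--             cuts.append(idx)
--         if "NN" in pos and info not in ["PERSON", "DATE"]:
--             found_noun_last = True
--     if not cuts:
--         return [rebuilt]
--     segs = []
--     start = 0
--     for c in cuts: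
--         segs.append(rebuilt[start:c + 1])
--         start = c + 1
--     return segs
-- ===== Notes on version B (the rewrite author's own statement) =====
-- stated objective: alternative
-- what changed: A builds transactions incrementally in one streaming pass that carries the growing current-segment list; B first scans once to record only the cut indices, then slices the rebuilt entry into segments between consecutive cuts (dropping the trailing remainder).
import Mathlib
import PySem

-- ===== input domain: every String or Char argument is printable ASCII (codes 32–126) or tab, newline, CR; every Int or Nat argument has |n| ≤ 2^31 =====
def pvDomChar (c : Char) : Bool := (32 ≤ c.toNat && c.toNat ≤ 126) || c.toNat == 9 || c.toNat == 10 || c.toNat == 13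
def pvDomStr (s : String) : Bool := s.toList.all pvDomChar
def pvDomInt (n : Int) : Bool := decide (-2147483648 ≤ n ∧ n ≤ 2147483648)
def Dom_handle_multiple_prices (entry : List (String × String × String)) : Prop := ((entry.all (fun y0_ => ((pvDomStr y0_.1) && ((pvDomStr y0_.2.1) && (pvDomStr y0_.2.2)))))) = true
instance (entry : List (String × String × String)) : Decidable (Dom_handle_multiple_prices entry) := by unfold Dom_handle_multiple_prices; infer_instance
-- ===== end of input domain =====

-- B replaces A's streaming segment accumulation by a cut-index scan followed by slicing;
-- objective: alternative decomposition (same cost).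

-- ===== PORT A =====
-- literal transliteration of A's single streaming loop
def handle_multiple_prices (entry : List (String × String × String)) : List (List (String × String × String)) :=
  let st := entry.foldl
    (fun (st : List (List (String × String × String)) × List (String × String × String) × Bool) x =>
      let found_trans := st.1
      let cur_entry := st.2.1
      let found_noun_last := st.2.2
      let word := x.1; let info := x.2.1; let pos := x.2.2
      let cur_entry := cur_entry ++ [(word, info, pos)]
      let st2 :=
        if info == "PRICE" && found_noun_last then
          (found_trans ++ [cur_entry], ([] : List (String × String × String)), false)
        else (found_trans, cur_entry, found_noun_last)
      let found_noun_last :=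
        if PySem.Str.isIn "NN" pos && !(info == "PERSON" || info == "DATE") then true
        else st2.2.2
      (st2.1, st2.2.1, found_noun_last))
    ([], [], false)
  if st.1 = [] then [st.2.1] else st.1

-- ===== PORT B =====
-- literal transliteration of B: first pass collects cut indices, second pass slices
def handle_multiple_prices_alt (entry : List (String × String × String)) : List (List (String × String × String)) :=
  let rebuilt := entry.map (fun x => (x.1, x.2.1, x.2.2))
  let st := (PySem.List.enumerate entry 0).foldl
    (fun (st : List Int × Bool) p =>
      let cuts := st.1
      let found_noun_last := st.2
      let idx := p.1
      let info := p.2.2.1; let pos := p.2.2.2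
      let st2 :=
        if info == "PRICE" && found_noun_last then (cuts ++ [idx], false)
        else (cuts, found_noun_last)
      let found_noun_last :=
        if PySem.Str.isIn "NN" pos && !(info == "PERSON" || info == "DATE") then true
        else st2.2
      (st2.1, found_noun_last))
    ([], false)
  let cuts := st.1
  if cuts = [] then [rebuilt]
  else
    (cuts.foldl
      (fun (acc : List (List (String × String × String)) × Int) c =>
        (acc.1 ++ [PySem.List.slice rebuilt (some acc.2) (some (c + 1))], c + 1))
      ([], 0)).1

-- ===== PRECONDITION & SPEC =====
def Spec_handle_multiple_prices (entry : List (String × String × String)) (out : List (List (String × String × String))) : Prop := out = handle_multiple_prices_alt entry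
instance (entry : List (String × String × String)) (out : List (List (String × String × String))) : Decidable (Spec_handle_multiple_prices entry out) := by unfold Spec_handle_multiple_prices; infer_instance

-- ===== CLAIM (what is proved, stated in full; the proofs are below) =====
def Claim_equal_handle_multiple_prices : Prop := ∀ (entry : List (String × String × String)), Dom_handle_multiple_prices entry → Spec_handle_multiple_prices entry (handle_multiple_prices entry)

-- ===== LEMMAS AND PROOFS =====

-- canonical recursive splitter both ports are related to
def pvGo (flag : Bool) : List (String × String × String) →
    List (List (String × String × String)) × List (String × String × String) × Bool
  | [] => ([], [], flag)
  | x :: rest =>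
    let cut := x.2.1 == "PRICE" && flag
    let flag' :=
      if PySem.Str.isIn "NN" x.2.2 && !(x.2.1 == "PERSON" || x.2.1 == "DATE") then true
      else if cut then false else flag
    let r := pvGo flag' rest
    if cut then ([x] :: r.1, r.2)
    else match r.1 with
      | s :: ss => ((x :: s) :: ss, r.2)
      | [] => ([], x :: r.2.1, r.2.2)

-- recursive cut-index list
def pvCutIdx (k : Int) (flag : Bool) : List (String × String × String) → List Int
  | [] => []
  | x :: rest =>
    let cut := x.2.1 == "PRICE" && flag
    let flag' :=
      if PySem.Str.isIn "NN" x.2.2 && !(x.2.1 == "PERSON" || x.2.1 == "DATE") then true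
      else if cut then false else flag
    (if cut then [k] else []) ++ pvCutIdx (k + 1) flag' rest

-- last indices of the segments
def pvEnds (k : Int) : List (List (String × String × String)) → List Int
  | [] => []
  | s :: ss => (k + s.length - 1) :: pvEnds (k + s.length) ss

theorem pvGo_foldA (xs : List (String × String × String)) :
    ∀ (trans : List (List (String × String × String)))
      (cur : List (String × String × String)) (flag : Bool),
    xs.foldl
      (fun (st : List (List (String × String × String)) × List (String × String × String) × Bool) x =>
        let found_trans := st.1
        let cur_entry := st.2.1
        let found_noun_last := st.2.2
        let word := x.1; let info := x.2.1; let pos := x.2.2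
        let cur_entry := cur_entry ++ [(word, info, pos)]
        let st2 :=
          if info == "PRICE" && found_noun_last then
            (found_trans ++ [cur_entry], ([] : List (String × String × String)), false)
          else (found_trans, cur_entry, found_noun_last)
        let found_noun_last :=
          if PySem.Str.isIn "NN" pos && !(info == "PERSON" || info == "DATE") then true
          else st2.2.2
        (st2.1, st2.2.1, found_noun_last)) (trans, cur, flag)
    = (match (pvGo flag xs).1 with
       | [] => (trans, cur ++ (pvGo flag xs).2.1, (pvGo flag xs).2.2)
       | s :: ss => (trans ++ (cur ++ s) :: ss, (pvGo flag xs).2.1, (pvGo flag xs).2.2)) := by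
  induction xs with
  | nil => intro trans cur flag; simp [pvGo]
  | cons x rest ih =>
    intro trans cur flag
    rw [List.foldl_cons]
    simp only [pvGo]
    split_ifs with h1 h2 h3
    · refine (ih (trans ++ [cur ++ [x]]) [] true).trans ?_
      cases hss : (pvGo true rest).1 <;> simp [hss, List.append_assoc]
    · refine (ih (trans ++ [cur ++ [x]]) [] false).trans ?_
      cases hss : (pvGo false rest).1 <;> simp [hss, List.append_assoc]
    · refine (ih trans (cur ++ [x]) true).trans ?_
      cases hss : (pvGo true rest).1 <;> simp [hss, List.append_assoc]
    · refine (ih trans (cur ++ [x]) flag).trans ?_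
      cases hss : (pvGo flag rest).1 <;> simp [hss, List.append_assoc]

theorem pvGo_flatten (flag : Bool) (xs : List (String × String × String)) :
    (pvGo flag xs).1.flatten ++ (pvGo flag xs).2.1 = xs := by
  induction xs generalizing flag with
  | nil => simp [pvGo]
  | cons x rest ih =>
    simp only [pvGo]
    set flag' := (if PySem.Str.isIn "NN" x.2.2 && !(x.2.1 == "PERSON" || x.2.1 == "DATE") then true
        else if x.2.1 == "PRICE" && flag then false else flag) with hf
    have h2 := ih flag'
    rcases hr : pvGo flag' rest with ⟨ss, rem, f⟩
    rw [hr] at h2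
    split_ifs with h
    · simpa using h2
    · cases ss with
      | nil => simpa using h2
      | cons s ss' => simpa using h2

theorem pvGo_ends (xs : List (String × String × String)) :
    ∀ (k : Int) (flag : Bool), pvCutIdx k flag xs = pvEnds k (pvGo flag xs).1 := by
  induction xs with
  | nil => intro k flag; simp [pvCutIdx, pvGo, pvEnds]
  | cons x rest ih =>
    intro k flag
    simp only [pvCutIdx, pvGo]
    set flag' := (if PySem.Str.isIn "NN" x.2.2 && !(x.2.1 == "PERSON" || x.2.1 == "DATE") then true
        else if x.2.1 == "PRICE" && flag then false else flag) with hf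
    have h2 := ih (k + 1) flag'
    rcases hr : pvGo flag' rest with ⟨ss, rem, f⟩
    rw [hr] at h2
    split_ifs with h
    · simp [h2, pvEnds]
    · cases ss with
      | nil => simpa [pvEnds] using h2
      | cons s ss' =>
        simp only [h2, pvEnds, List.length_cons]
        push_cast
        have : k + 1 + (s.length : Int) = k + ((s.length : Int) + 1) := by ring
        simp [this]

theorem pvCutIdx_foldB (xs : List (String × String × String)) :
    ∀ (k : Int) (cuts : List Int) (flag : Bool),
    (PySem.List.enumerate xs k).foldl
      (fun (st : List Int × Bool) p =>
        let cuts := st.1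
        let found_noun_last := st.2
        let idx := p.1
        let info := p.2.2.1; let pos := p.2.2.2
        let st2 :=
          if info == "PRICE" && found_noun_last then (cuts ++ [idx], false)
          else (cuts, found_noun_last)
        let found_noun_last :=
          if PySem.Str.isIn "NN" pos && !(info == "PERSON" || info == "DATE") then true
          else st2.2
        (st2.1, found_noun_last)) (cuts, flag)
    = (cuts ++ pvCutIdx k flag xs, (pvGo flag xs).2.2) := by
  induction xs with
  | nil => intro k cuts flag; simp [pvCutIdx, pvGo, PySem.List.enumerate]
  | cons x rest ih =>
    intro k cuts flag
    rw [PySem.List.enumerate_cons, List.foldl_cons]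
    simp only [pvCutIdx, pvGo]
    split_ifs with h1 h2 h3
    · refine (ih (k + 1) (cuts ++ [k]) true).trans ?_
      cases hss : (pvGo true rest).1 <;> simp [hss, List.append_assoc]
    · refine (ih (k + 1) (cuts ++ [k]) false).trans ?_
      cases hss : (pvGo false rest).1 <;> simp [hss, List.append_assoc]
    · refine (ih (k + 1) cuts true).trans ?_
      cases hss : (pvGo true rest).1 <;> simp [hss, List.append_assoc]
    · refine (ih (k + 1) cuts flag).trans ?_
      cases hss : (pvGo flag rest).1 <;> simp [hss, List.append_assoc]

theorem pvSliceSeg (ss : List (List (String × String × String))) :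
    ∀ (pre rem : List (String × String × String))
      (segs0 : List (List (String × String × String))),
    (pvEnds (pre.length : Int) ss).foldl
      (fun (acc : List (List (String × String × String)) × Int) c =>
        (acc.1 ++ [PySem.List.slice (pre ++ (ss.flatten ++ rem)) (some acc.2) (some (c + 1))], c + 1))
      (segs0, (pre.length : Int))
    = (segs0 ++ ss, ((pre.length : Int) + ss.flatten.length)) := by
  induction ss with
  | nil => intro pre rem segs0; simp [pvEnds]
  | cons s ss' ih =>
    intro pre rem segs0
    simp only [pvEnds, List.foldl_cons, List.flatten_cons]
    have e1 : ((pre.length : Int) + (s.length : Int) - 1 + 1) = (pre.length : Int) + (s.length : Int) := by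
      ring
    rw [e1]
    have e2 : pre ++ (s ++ ss'.flatten ++ rem) = pre ++ (s ++ (ss'.flatten ++ rem)) := by
      simp [List.append_assoc]
    have hsl : PySem.List.slice (pre ++ (s ++ ss'.flatten ++ rem)) (some (pre.length : Int))
        (some ((pre.length : Int) + (s.length : Int))) = s := by
      rw [e2, PySem.List.slice_natCast_add, List.drop_left, List.take_left]
    rw [hsl]
    have e3 : ((pre.length : Int) + (s.length : Int)) = (((pre ++ s).length : Nat) : Int) := by
      push_cast [List.length_append]; ring
    have e4 : pre ++ (s ++ ss'.flatten ++ rem) = (pre ++ s) ++ (ss'.flatten ++ rem) := by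
      simp [List.append_assoc]
    rw [e3, e4]  -- hope the fold body's list literal matches
    refine (ih (pre ++ s) rem (segs0 ++ [s])).trans ?_
    push_cast [List.length_append, List.length_flatten]
    rw [Prod.mk.injEq]
    constructor
    · simp
    · ring

-- ===== VERDICT (by name: the statement is the Claim_ definition above) =====
theorem handle_multiple_prices_spec : Claim_equal_handle_multiple_prices := by
  intro entry _hdom
  show handle_multiple_prices entry = handle_multiple_prices_alt entry
  have hreb : entry.map (fun x : String × String × String => (x.1, x.2.1, x.2.2)) = entry := by
    simp
  simp only [handle_multiple_prices, handle_multiple_prices_alt, hreb]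
  rw [pvGo_foldA entry [] [] false, pvCutIdx_foldB entry 0 [] false, List.nil_append,
    pvGo_ends entry 0 false]
  have hfl := pvGo_flatten false entry
  rcases hg : pvGo false entry with ⟨ss, rem, f⟩
  rw [hg] at hfl
  cases ss with
  | nil =>
    simp only [List.flatten_nil, List.nil_append] at hfl
    simp [pvEnds, hfl]
  | cons s ss' =>
    have hcut : pvEnds 0 (s :: ss') ≠ [] := by simp [pvEnds]
    have hB := pvSliceSeg (s :: ss') [] rem []
    simp only [List.length_nil, Nat.cast_zero, List.nil_append] at hB
    rw [← hfl]
    simp only [List.flatten_cons, List.append_assoc] at hB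
    simp [hcut, hB]
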